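-- pv_equiv track=rewrite | github.com/ISEL-HGU/SimFin | gv_ae_test.py | del_index_num
-- ===== SOURCE A (Python) =====
-- def is_number(s):
--     try:
--         float(s)
--         return True
--     except ValueError:
--         return False
--
-- def del_index_num(s):
--     temp = ''
--     is_passed = False
--     for c in reversed(s):
--         if is_number(c) and not is_passed:
--             continue
--         else:
--             temp += c
--             is_passed = True
--
--     temp = list(temp)
--     temp.reverse()
--     s = ''.join(temp)
--
--     return s
-- ===== SOURCE B (Python) =====
-- def is_number(s):
--     try:
--         float(s)
--         return True
--     except ValueError:
--         return False
--
-- def del_index_num(s):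
--     i = len(s)
--     while i > 0 and is_number(s[i - 1]):
--         i -= 1
--     return s[:i]
-- ===== Notes on version B (the rewrite author's own statement) =====
-- stated objective: faster
-- what changed: B finds the boundary index by scanning backward with a counter and returns a single slice, instead of A's accumulate-into-a-string-with-a-flag over reversed(s) followed by a list reversal and join.
import Mathlib
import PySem

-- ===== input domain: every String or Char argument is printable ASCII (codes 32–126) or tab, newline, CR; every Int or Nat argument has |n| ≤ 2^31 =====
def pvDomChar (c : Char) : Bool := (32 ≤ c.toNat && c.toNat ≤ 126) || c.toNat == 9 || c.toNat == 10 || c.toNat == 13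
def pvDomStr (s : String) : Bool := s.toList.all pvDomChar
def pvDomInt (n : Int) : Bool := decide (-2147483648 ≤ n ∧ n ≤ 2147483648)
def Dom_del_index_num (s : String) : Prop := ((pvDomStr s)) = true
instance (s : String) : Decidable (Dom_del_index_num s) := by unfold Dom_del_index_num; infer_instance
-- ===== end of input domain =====

-- B computes the boundary index by a backward scan and slices once, instead of A's
-- accumulate-with-a-flag over reversed(s) plus a final reversal (objective: simpler).

-- ===== PORT A =====
-- is_number(c) for a SINGLE printable-ASCII (or tab/newline/CR) character: float(c)
-- succeeds exactly for the digits '0'..'9' (exact on the stated ASCII domain).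
def is_number (c : Char) : Bool := c.isDigit

-- the 'for c in reversed(s)' loop, state = (temp as list of chars, is_passed)
def del_index_num (s : String) : String :=
  -- temp = list(temp); temp.reverse(); ''.join(temp)
  String.ofList
    (s.toList.reverse.foldl
      (fun (acc : List Char × Bool) c =>
        if is_number c && !acc.2 then acc else (acc.1 ++ [c], true))
      ([], false)).1.reverse

-- ===== PORT B =====
-- the 'while i > 0 and is_number(s[i-1]): i -= 1' loop, counting trailing digits
def del_index_num_alt_count : List Char → Nat
  | [] => 0
  | c :: t => if is_number c then 1 + del_index_num_alt_count t else 0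

def del_index_num_alt (s : String) : String :=
  String.ofList (s.toList.take (s.toList.length - del_index_num_alt_count s.toList.reverse))

-- ===== PRECONDITION & SPEC =====
def Spec_del_index_num (s : String) (out : String) : Prop := out = del_index_num_alt s
instance (s : String) (out : String) : Decidable (Spec_del_index_num s out) := by unfold Spec_del_index_num; infer_instance

-- ===== CLAIM (what is proved, stated in full; the proofs are below) =====
def Claim_equal_del_index_num : Prop := ∀ (s : String), Dom_del_index_num s → Spec_del_index_num s (del_index_num s)

-- ===== LEMMAS AND PROOFS =====

-- once is_passed is true, A's loop appends every remaining character
theorem pv_foldl_passed (r acc : List Char) :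
    r.foldl (fun (acc : List Char × Bool) c =>
      if is_number c && !acc.2 then acc else (acc.1 ++ [c], true)) (acc, true)
    = (acc ++ r, true) := by
  induction r generalizing acc with
  | nil => simp
  | cons c t ih =>
    rw [List.foldl_cons]
    have hstep : (if (is_number c && !(true : Bool)) = true then (acc, true)
        else (acc ++ [c], true)) = (acc ++ [c], true) := by simp
    rw [hstep, ih]
    simp

-- A's loop computes dropWhile is_number of its input
theorem pv_foldl_drop (r : List Char) :
    (r.foldl (fun (acc : List Char × Bool) c =>
      if is_number c && !acc.2 then acc else (acc.1 ++ [c], true)) ([], false)).1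
    = r.dropWhile is_number := by
  induction r with
  | nil => simp [List.dropWhile]
  | cons c t ih =>
    by_cases h : is_number c
    · rw [List.foldl_cons]
      have hstep : (if (is_number c && !(false : Bool)) = true then (([] : List Char), false)
          else ([] ++ [c], true)) = ([], false) := by simp [h]
      rw [hstep, ih]
      simp [List.dropWhile, h]
    · rw [List.foldl_cons]
      have hstep : (if (is_number c && !(false : Bool)) = true then (([] : List Char), false)
          else ([] ++ [c], true)) = ([c], true) := by simp [h]
      rw [hstep, pv_foldl_passed]
      simp [List.dropWhile, h]

-- B's counter is the length of the takeWhile prefix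
theorem pv_count_eq (r : List Char) :
    del_index_num_alt_count r = (r.takeWhile is_number).length := by
  induction r with
  | nil => rfl
  | cons c t ih =>
    by_cases h : is_number c
    · simp [del_index_num_alt_count, h, List.takeWhile, ih]
      omega
    · simp [del_index_num_alt_count, h, List.takeWhile]

theorem pv_take_helper (a b l : List Char) (h : l = a ++ b) :
    l.take (l.length - b.length) = a := by
  subst h
  rw [List.length_append, Nat.add_sub_cancel]
  exact List.take_left

theorem pv_take_drop (l : List Char) :
    l.take (l.length - (l.reverse.takeWhile is_number).length)
    = (l.reverse.dropWhile is_number).reverse := by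
  have hsplit : l = (l.reverse.dropWhile is_number).reverse ++ (l.reverse.takeWhile is_number).reverse := by
    rw [← List.reverse_append, List.takeWhile_append_dropWhile, List.reverse_reverse]
  have h := pv_take_helper _ _ _ hsplit
  simpa using h

-- ===== VERDICT (by name: the statement is the Claim_ definition above) =====
theorem del_index_num_spec : Claim_equal_del_index_num := by
  intro s _
  unfold Spec_del_index_num del_index_num del_index_num_alt
  rw [pv_count_eq, pv_take_drop, pv_foldl_drop]
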